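-- pv_equiv track=rewrite | github.com/raffomartini/AoC2018 | Day02/day02.py | check_sn
-- ===== SOURCE A (Python) =====
-- import collections
--
-- def check_sn(sn):
--     result = [0,0]
--     for _, count in collections.Counter(sn).items():
--         if count == 3:
--             result[1] = 1
--         if count == 2:
--             result[0] = 1
--     return result
-- ===== SOURCE B (Python) =====
-- def check_sn(sn):
--     # sort-then-run-length scan instead of a Counter hash map
--     s = sorted(sn)
--
--     def scan(s, h2, h3):
--         if not s:
--             return h2, h3
--         c = s[0]
--         run = 1
--         while run < len(s) and s[run] == c:
--             run += 1
--         return scan(s[run:], h2 or run == 2, h3 or run == 3)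
--
--     h2, h3 = scan(s, False, False)
--     return [int(h2), int(h3)]
-- ===== Notes on version B (the rewrite author's own statement) =====
-- stated objective: alternative
-- what changed: Replaces the Counter frequency table with sorting the characters and run-length scanning consecutive equal runs, setting the two flags from run lengths.
import Mathlib
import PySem

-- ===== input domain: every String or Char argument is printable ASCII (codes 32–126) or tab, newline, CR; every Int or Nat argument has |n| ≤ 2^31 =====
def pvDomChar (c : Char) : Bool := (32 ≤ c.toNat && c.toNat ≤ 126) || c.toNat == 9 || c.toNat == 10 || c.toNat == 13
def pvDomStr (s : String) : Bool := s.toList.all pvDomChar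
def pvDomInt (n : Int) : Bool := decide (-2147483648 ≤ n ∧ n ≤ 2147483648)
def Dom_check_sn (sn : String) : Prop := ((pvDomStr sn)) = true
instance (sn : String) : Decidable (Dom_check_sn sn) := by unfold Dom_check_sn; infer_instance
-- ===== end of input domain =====

-- B replaces A's Counter frequency table with sort + run-length scan (alternative algorithm, same values).

-- ===== PORT A =====
def check_sn (sn : String) : List Int :=
  let r := (PySem.Dict.counter sn.toList).items.foldl
    (fun (r : Int × Int) (p : Char × Int) =>
      let r := if p.2 = 3 then (r.1, 1) else r
      if p.2 = 2 then (1, r.2) else r)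
    (0, 0)
  [r.1, r.2]

-- ===== PORT B =====
-- Source B's recursive `scan`: consume the leading run of equal chars (the inner while),
-- update the two flags from the run length, recurse on the remainder s[run:].
def runScan : List Char → Bool → Bool → Bool × Bool
  | [], h2, h3 => (h2, h3)
  | c :: rest, h2, h3 =>
      let run := 1 + (rest.takeWhile (fun x => x == c)).length
      runScan (rest.dropWhile (fun x => x == c)) (h2 || (run == 2)) (h3 || (run == 3))
termination_by l _ _ => l.length
decreasing_by
  simpa using Nat.lt_succ_of_le (List.length_dropWhile_le _ _)

def check_sn_alt (sn : String) : List Int :=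
  let s := PySem.List.sorted sn.toList (fun c => c) false
  let r := runScan s false false
  [if r.1 then 1 else 0, if r.2 then 1 else 0]

-- ===== PRECONDITION & SPEC =====
def Spec_check_sn (sn : String) (out : List Int) : Prop := out = check_sn_alt sn
instance (sn : String) (out : List Int) : Decidable (Spec_check_sn sn out) := by unfold Spec_check_sn; infer_instance

-- ===== CLAIM (what is proved, stated in full; the proofs are below) =====
def Claim_equal_check_sn : Prop := ∀ (sn : String), Dom_check_sn sn → Spec_check_sn sn (check_sn sn)

-- ===== LEMMAS AND PROOFS =====

-- "some character occurs exactly n times in l"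
def hasCnt (l : List Char) (n : Nat) : Bool := l.any (fun c => l.count c == n)

lemma foldA (ps : List (Char × Int)) (a b : Int) :
    ps.foldl
      (fun (r : Int × Int) (p : Char × Int) =>
        let r := if p.2 = 3 then (r.1, 1) else r
        if p.2 = 2 then (1, r.2) else r)
      (a, b)
    = (if ps.any (fun p => p.2 == 2) then 1 else a,
       if ps.any (fun p => p.2 == 3) then 1 else b) := by
  induction ps generalizing a b with
  | nil => simp
  | cons p t ih =>
    simp only [List.foldl_cons, List.any_cons]
    rw [ih]
    by_cases h3 : p.2 = 3 <;> by_cases h2 : p.2 = 2 <;>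
      simp [h2, h3]

lemma any_ofList (l : List Char) (p : Char → Bool) :
    (PySem.Set.ofList l).any p = l.any p := by
  rw [Bool.eq_iff_iff]
  simp [List.any_eq_true, PySem.Set.mem_ofList]

lemma checkA (sn : String) :
    check_sn sn = [if hasCnt sn.toList 2 then 1 else 0,
                   if hasCnt sn.toList 3 then 1 else 0] := by
  unfold check_sn
  rw [PySem.Dict.items_counter, foldA]
  have hcast : ∀ (m : Nat) (k : Nat),
      (((m : Int)) == ((k : Nat) : Int)) = (m == k) := by
    intro m k; rw [Bool.eq_iff_iff]; simp
  unfold hasCnt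
  simp only [List.any_map, Function.comp_def]
  rw [any_ofList, any_ofList]
  have h2 : (fun k => ((sn.toList.count k : Int) == 2)) =
      (fun c => sn.toList.count c == 2) := by
    funext k; exact hcast (sn.toList.count k) 2
  have h3 : (fun k => ((sn.toList.count k : Int) == 3)) =
      (fun c => sn.toList.count c == 3) := by
    funext k; exact hcast (sn.toList.count k) 3
  rw [h2, h3]

lemma head_dropWhile_false (p : Char → Bool) (l : List Char) (e : Char) (d : List Char)
    (h : l.dropWhile p = e :: d) : p e = false := by
  have hne : l.dropWhile p ≠ [] := by rw [h]; simp
  have := List.head_dropWhile_not p hne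
  simp only [h] at this
  simpa using this

-- every element of dropWhile (· == c) of a sorted tail is strictly above c
lemma dropWhile_gt (c : Char) (rest : List Char) (hp : (c :: rest).Pairwise (· ≤ ·)) :
    ∀ x ∈ rest.dropWhile (fun y => y == c), c < x := by
  obtain ⟨hle, hrest⟩ := List.pairwise_cons.mp hp
  cases hdd : rest.dropWhile (fun y => y == c) with
  | nil => simp
  | cons e d' =>
    have hd2 : (e :: d').Pairwise (· ≤ ·) :=
      hdd ▸ hrest.sublist (List.dropWhile_sublist _)
    have hce : c < e := by
      have hmem : e ∈ rest := (List.dropWhile_sublist _).mem (by rw [hdd]; simp)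
      have : ¬ e = c := by simpa using head_dropWhile_false _ rest e d' hdd
      exact lt_of_le_of_ne (hle e hmem) (Ne.symm this)
    intro x hx
    rcases List.mem_cons.mp hx with h | h
    · exact h ▸ hce
    · exact lt_of_lt_of_le hce ((List.pairwise_cons.mp hd2).1 x h)

lemma hasCnt_cons_sorted (c : Char) (rest : List Char)
    (hp : (c :: rest).Pairwise (· ≤ ·)) (k : Nat) :
    hasCnt (c :: rest) k
      = ((1 + (rest.takeWhile (fun x => x == c)).length == k)
          || hasCnt (rest.dropWhile (fun x => x == c)) k) := by
  have hrest : rest.takeWhile (fun x => x == c) ++ rest.dropWhile (fun x => x == c) = rest :=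
    List.takeWhile_append_dropWhile
  have htc : ∀ x ∈ rest.takeWhile (fun x => x == c), x = c := by
    intro x hx; simpa using List.mem_takeWhile_imp hx
  have hdc := dropWhile_gt c rest hp
  have hcount_c : (c :: rest).count c = 1 + (rest.takeWhile (fun x => x == c)).length := by
    have h1 : (rest.takeWhile (fun x => x == c)).count c
        = (rest.takeWhile (fun x => x == c)).length :=
      List.count_eq_length.mpr (fun b hb => (htc b hb).symm)
    have h2 : (rest.dropWhile (fun x => x == c)).count c = 0 :=
      List.count_eq_zero.mpr (fun hmem => lt_irrefl c (hdc c hmem))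
    have h3 : rest.count c = (rest.takeWhile (fun x => x == c)).length := by
      conv_lhs => rw [← hrest]
      rw [List.count_append, h1, h2]
      rw [Nat.add_zero]
    rw [List.count_cons_self, h3]
    omega
  have hcount_ne : ∀ x, x ≠ c →
      (c :: rest).count x = (rest.dropWhile (fun x => x == c)).count x := by
    intro x hxc
    have h1 : (rest.takeWhile (fun x => x == c)).count x = 0 :=
      List.count_eq_zero.mpr (fun hmem => hxc (htc x hmem))
    have h2 : rest.count x = (rest.dropWhile (fun x => x == c)).count x := by
      conv_lhs => rw [← hrest]
      rw [List.count_append, h1, Nat.zero_add]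
    have h3 : (c == x) = false := by simpa using Ne.symm hxc
    rw [List.count_cons, h3, h2]
    simp
  rw [Bool.eq_iff_iff]
  simp only [hasCnt, List.any_eq_true, beq_iff_eq, Bool.or_eq_true]
  constructor
  · rintro ⟨x, hx, hcx⟩
    by_cases hxc : x = c
    · subst hxc; left; rw [hcount_c] at hcx; exact hcx
    · right
      have hxrest : x ∈ rest := by
        rcases List.mem_cons.mp hx with h | h
        · exact absurd h hxc
        · exact h
      have hxd : x ∈ rest.dropWhile (fun x => x == c) := by
        rcases List.mem_append.mp (hrest ▸ hxrest) with h | h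
        · exact absurd (htc x h) hxc
        · exact h
      exact ⟨x, hxd, by rw [← hcount_ne x hxc]; exact hcx⟩
  · rintro (h | ⟨x, hx, hcx⟩)
    · exact ⟨c, List.mem_cons_self, by rw [hcount_c]; exact h⟩
    · have hxc : x ≠ c := ne_of_gt (hdc x hx)
      have hxrest : x ∈ c :: rest :=
        List.mem_cons_of_mem c ((List.dropWhile_sublist _).mem hx)
      exact ⟨x, hxrest, by rw [hcount_ne x hxc]; exact hcx⟩

-- run-length scan on a sorted list reads off exactly the multiplicities
lemma runScan_eq (s : List Char) (hs : s.Pairwise (· ≤ ·)) (h2 h3 : Bool) :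
    runScan s h2 h3 = (h2 || hasCnt s 2, h3 || hasCnt s 3) := by
  induction s, h2, h3 using runScan.induct with
  | case1 h2 h3 => simp [runScan, hasCnt]
  | case2 c rest h2 h3 run ih =>
    have hd : (rest.dropWhile (fun x => x == c)).Pairwise (· ≤ ·) :=
      (List.pairwise_cons.mp hs).2.sublist (List.dropWhile_sublist _)
    simp only [runScan]
    rw [ih hd, hasCnt_cons_sorted c rest hs 2, hasCnt_cons_sorted c rest hs 3,
      Bool.or_assoc, Bool.or_assoc]

lemma hasCnt_perm (l l' : List Char) (h : l.Perm l') (k : Nat) :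
    hasCnt l k = hasCnt l' k := by
  rw [Bool.eq_iff_iff]
  simp only [hasCnt, List.any_eq_true]
  constructor <;> rintro ⟨x, hx, hcx⟩
  · exact ⟨x, h.mem_iff.mp hx, by rw [← h.count_eq]; exact hcx⟩
  · exact ⟨x, h.mem_iff.mpr hx, by rw [h.count_eq]; exact hcx⟩

lemma checkB (sn : String) :
    check_sn_alt sn = [if hasCnt sn.toList 2 then 1 else 0,
                       if hasCnt sn.toList 3 then 1 else 0] := by
  have hperm : (PySem.List.sorted sn.toList (fun c => c) false).Perm sn.toList :=
    PySem.List.sorted_perm _ _ _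
  have hsorted : (PySem.List.sorted sn.toList (fun c => c) false).Pairwise (· ≤ ·) := by
    simpa using PySem.List.sorted_pairwise (xs := sn.toList) (key := fun c => c)
  simp only [check_sn_alt]
  rw [runScan_eq _ hsorted, hasCnt_perm _ _ hperm 2, hasCnt_perm _ _ hperm 3]
  simp

-- ===== VERDICT (by name: the statement is the Claim_ definition above) =====
theorem check_sn_spec : Claim_equal_check_sn := by
  intro sn _
  unfold Spec_check_sn
  rw [checkA, checkB]
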